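-- pv_equiv track=rewrite | github.com/Codrux2200/DS | ds.py | prix_achat
-- ===== SOURCE A (Python) =====
-- def tous_disponible(panier_dict, prix):
--     for node in panier_dict.keys():
--         if node not in prix:
--             return False
--     return True
--
-- def recup_elements(node, prix):
--     for i in prix.items():
--         if i[0] == node[0]:
--             return (i[1] * node[1])
--
-- def prix_achat(panier_dict, prix):
--     if (tous_disponible(panier_dict, prix) == False):
--         print ("il manque 1 ou plusieurs produit")
--         return 0
--     value = 0
--     for node in panier_dict.items():
--         value += recup_elements(node, prix)
--     return value
-- ===== SOURCE B (Python) =====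
-- def prix_achat(panier_dict, prix):
--     # One pass: running total + missing flag (A does a validation pass then a summation pass).
--     value = 0
--     missing = False
--     for key, qty in panier_dict.items():
--         if key in prix:
--             value += prix[key] * qty
--         else:
--             missing = True
--     if missing:
--         print("il manque 1 ou plusieurs produit")
--         return 0
--     return value
-- ===== Notes on version B (the rewrite author's own statement) =====
-- stated objective: alternative
-- what changed: A runs a separate validation pass and then a summation pass whose helper rescans prix.items() for each basket item; B fuses everything into one traversal of the basket maintaining a running total and a missing flag, using direct dict lookup instead of an inner scan.
import Mathlib
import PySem

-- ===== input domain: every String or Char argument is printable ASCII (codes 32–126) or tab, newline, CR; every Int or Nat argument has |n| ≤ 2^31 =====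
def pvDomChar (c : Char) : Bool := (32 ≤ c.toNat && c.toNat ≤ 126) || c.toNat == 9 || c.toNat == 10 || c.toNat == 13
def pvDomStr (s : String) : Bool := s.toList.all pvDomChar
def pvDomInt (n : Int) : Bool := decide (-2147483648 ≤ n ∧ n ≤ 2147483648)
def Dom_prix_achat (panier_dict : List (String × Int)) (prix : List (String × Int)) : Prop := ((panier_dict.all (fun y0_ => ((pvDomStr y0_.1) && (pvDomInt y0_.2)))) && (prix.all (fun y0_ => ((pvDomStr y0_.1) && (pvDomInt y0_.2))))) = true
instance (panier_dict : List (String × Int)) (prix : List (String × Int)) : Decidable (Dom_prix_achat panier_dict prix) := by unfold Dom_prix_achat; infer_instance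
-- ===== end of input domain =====

-- B changes only how the total is computed (one fused pass, direct lookup); the equivalence is about
-- the RETURN value only (both Pythons print the same message when a product is missing).

-- ===== PORT A =====
-- for node in panier_dict.keys(): if node not in prix: return False / return True
def tousDisponible : List (String × Int) → List (String × Int) → Bool
  | [], _ => true
  | node :: rest, prix =>
    if (prix.any (fun i => i.1 == node.1)) then tousDisponible rest prix else false

-- for i in prix.items(): if i[0] == node[0]: return i[1] * node[1]   (None if no match, guarded by caller)
def recupElements (node : String × Int) : List (String × Int) → Option Int
  | [] => none
  | i :: rest => if i.1 == node.1 then some (i.2 * node.2) else recupElements node rest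

def prix_achat (panier_dict : List (String × Int)) (prix : List (String × Int)) : Int :=
  if tousDisponible panier_dict prix = false then 0
  else
    -- value += recup_elements(node, prix); the guard guarantees a match, so getD 0 is never taken
    panier_dict.foldl (fun value node => value + (recupElements node prix).getD 0) 0

-- ===== PORT B =====
-- key in prix / prix[key]: first-match lookup in the association list
def lookupFirst (k : String) : List (String × Int) → Option Int
  | [] => none
  | i :: rest => if i.1 == k then some i.2 else lookupFirst k rest

-- single pass keeping (running total, missing flag)
def prix_achat_alt (panier_dict : List (String × Int)) (prix : List (String × Int)) : Int :=
  let st := panier_dict.foldl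
    (fun (st : Int × Bool) kv =>
      match lookupFirst kv.1 prix with
      | some p => (st.1 + p * kv.2, st.2)
      | none => (st.1, true)) (0, false)
  if st.2 then 0 else st.1

-- ===== PRECONDITION & SPEC =====
def Spec_prix_achat (panier_dict : List (String × Int)) (prix : List (String × Int)) (out : Int) : Prop := out = prix_achat_alt panier_dict prix
instance (panier_dict : List (String × Int)) (prix : List (String × Int)) (out : Int) : Decidable (Spec_prix_achat panier_dict prix out) := by unfold Spec_prix_achat; infer_instance

-- ===== CLAIM (what is proved, stated in full; the proofs are below) =====
def Claim_equal_prix_achat : Prop := ∀ (panier_dict : List (String × Int)) (prix : List (String × Int)), Dom_prix_achat panier_dict prix → Spec_prix_achat panier_dict prix (prix_achat panier_dict prix)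

-- ===== LEMMAS AND PROOFS =====

theorem recup_eq_lookup (node : String × Int) (prix : List (String × Int)) :
    recupElements node prix = (lookupFirst node.1 prix).map (· * node.2) := by
  induction prix with
  | nil => rfl
  | cons i rest ih => simp [recupElements, lookupFirst, ih]; split <;> simp

theorem any_eq_isSome (k : String) (prix : List (String × Int)) :
    prix.any (fun i => i.1 == k) = (lookupFirst k prix).isSome := by
  induction prix with
  | nil => rfl
  | cons i rest ih =>
    by_cases hk : i.1 == k
    · simp [lookupFirst, hk]
    · simp [lookupFirst, hk, ih]

-- the missing flag after B's fold is (initial flag OR ¬ tous_disponible)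
theorem foldB_snd (panier prix : List (String × Int)) (v : Int) (b : Bool) :
    (panier.foldl (fun (st : Int × Bool) kv =>
      match lookupFirst kv.1 prix with
      | some p => (st.1 + p * kv.2, st.2)
      | none => (st.1, true)) (v, b)).2 = (b || !tousDisponible panier prix) := by
  induction panier generalizing v b with
  | nil => simp [tousDisponible]
  | cons kv rest ih =>
    simp only [List.foldl_cons, tousDisponible]
    by_cases h : prix.any (fun i => i.1 == kv.1) = true
    · have hs : (lookupFirst kv.1 prix).isSome := (any_eq_isSome kv.1 prix) ▸ h
      cases hl : lookupFirst kv.1 prix with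
      | none => rw [hl] at hs; simp at hs
      | some p => simp [ih, h]
    · have hl : lookupFirst kv.1 prix = none := by
        rw [any_eq_isSome] at h
        cases hl : lookupFirst kv.1 prix with
        | none => rfl
        | some p => rw [hl] at h; simp at h
      simp [hl, ih, h]

-- when every product is available, B's running total equals A's summation fold
theorem foldB_fst (panier prix : List (String × Int)) (v : Int) (b : Bool)
    (ht : tousDisponible panier prix = true) :
    (panier.foldl (fun (st : Int × Bool) kv =>
      match lookupFirst kv.1 prix with
      | some p => (st.1 + p * kv.2, st.2)
      | none => (st.1, true)) (v, b)).1
    = panier.foldl (fun value node => value + (recupElements node prix).getD 0) v := by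
  induction panier generalizing v b with
  | nil => rfl
  | cons kv rest ih =>
    simp only [tousDisponible] at ht
    by_cases h : prix.any (fun i => i.1 == kv.1) = true
    · rw [if_pos h] at ht
      have hs : (lookupFirst kv.1 prix).isSome := (any_eq_isSome kv.1 prix) ▸ h
      cases hl : lookupFirst kv.1 prix with
      | none => rw [hl] at hs; simp at hs
      | some p =>
        simp only [List.foldl_cons, hl]
        rw [ih _ _ ht, recup_eq_lookup, hl]
        simp
    · rw [if_neg h] at ht; simp at ht

-- ===== VERDICT (by name: the statement is the Claim_ definition above) =====
theorem prix_achat_spec : Claim_equal_prix_achat := by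
  intro panier prix _
  unfold Spec_prix_achat prix_achat prix_achat_alt
  by_cases ht : tousDisponible panier prix = true
  · rw [if_neg (by simp [ht])]
    have hs := foldB_snd panier prix 0 false
    have hf := foldB_fst panier prix 0 false ht
    simp only []
    rw [hs, ht]
    simp [hf]
  · have ht' : tousDisponible panier prix = false := by
      cases h : tousDisponible panier prix
      · rfl
      · exact absurd h ht
    rw [if_pos ht']
    have hs := foldB_snd panier prix 0 false
    simp only []
    rw [hs, ht']
    simp
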